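-- pv_equiv track=rewrite | github.com/FeHuX0/AOIS | Lab1/src/bit_utils.py | add_unsigned_bits
-- ===== SOURCE A (Python) =====
-- from typing import Iterable, List, Tuple
--
-- Bits = List[int]
--
-- def validate_bits(bits: Iterable[int], *, length: int | None = None) -> Bits:
--     """Validate incoming bits and return them as a list."""
--     array = list(bits)
--     if length is not None and len(array) != length:
--         raise ValueError(f"expected {length} bits, got {len(array)}")
--     for bit in array:
--         if bit not in (0, 1):
--             raise ValueError("bits must contain only 0 and 1")
--     return array
--
-- def add_unsigned_bits(left: Iterable[int], right: Iterable[int]) -> Tuple[Bits, int]: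
--     """Add unsigned numbers represented by equal-length bit arrays."""
--     a = validate_bits(left)
--     b = validate_bits(right)
--     if len(a) != len(b):
--         raise ValueError("bit arrays must have the same length")
--
--     carry = 0
--     result = [0] * len(a)
--     idx = len(a) - 1
--     while idx >= 0:
--         total = a[idx] + b[idx] + carry
--         result[idx] = total % 2
--         carry = 1 if total >= 2 else 0
--         idx -= 1
--     return result, carry
-- ===== SOURCE B (Python) =====
-- from typing import Iterable, List, Tuple
--
-- Bits = List[int]
--
-- def validate_bits(bits: Iterable[int], *, length: int | None = None) -> Bits:
--     """Validate incoming bits and return them as a list."""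
--     array = list(bits)
--     if length is not None and len(array) != length:
--         raise ValueError(f"expected {length} bits, got {len(array)}")
--     for bit in array:
--         if bit not in (0, 1):
--             raise ValueError("bits must contain only 0 and 1")
--     return array
--
-- def add_unsigned_bits(left: Iterable[int], right: Iterable[int]) -> Tuple[Bits, int]:
--     """Add unsigned numbers represented by equal-length bit arrays."""
--     a = validate_bits(left)
--     b = validate_bits(right)
--     if len(a) != len(b):
--         raise ValueError("bit arrays must have the same length")
--
--     n = len(a)
--     total = 0
--     for x, y in zip(a, b):
--         total = 2 * total + x + y
--     result = [(total // 2 ** (n - 1 - i)) % 2 for i in range(n)]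
--     return result, total // 2 ** n
-- ===== Notes on version B (the rewrite author's own statement) =====
-- stated objective: alternative
-- what changed: Replaces the index-based LSB-to-MSB ripple-carry loop with a pack/add/unpack scheme: fold both arrays into a single integer MSB-first, add once, then extract the low n bits and the carry arithmetically.
import Mathlib
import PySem

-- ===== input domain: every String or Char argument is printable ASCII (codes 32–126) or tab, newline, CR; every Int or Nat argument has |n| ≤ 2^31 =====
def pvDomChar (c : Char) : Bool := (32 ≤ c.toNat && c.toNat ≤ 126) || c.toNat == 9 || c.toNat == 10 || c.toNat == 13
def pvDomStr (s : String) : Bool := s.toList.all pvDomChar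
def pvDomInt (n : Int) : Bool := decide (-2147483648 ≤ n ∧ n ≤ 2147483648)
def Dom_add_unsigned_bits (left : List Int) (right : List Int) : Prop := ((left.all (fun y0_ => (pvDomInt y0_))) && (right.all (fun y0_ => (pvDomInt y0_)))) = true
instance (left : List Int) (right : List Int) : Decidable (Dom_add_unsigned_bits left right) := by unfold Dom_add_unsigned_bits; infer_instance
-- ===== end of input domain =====

-- B replaces A's index-based ripple-carry loop by packing both bit arrays into one
-- integer (MSB-first fold), adding once, and unpacking bits and carry arithmetically
-- (objective: alternative algorithm, same asymptotic cost).


-- ===== PORT A =====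
-- validate_bits only checks (raising outside Pre_) and returns the list unchanged.
def validateBitsA (bits : List Int) : List Int := bits

-- the 'while idx >= 0' loop; k = idx + 1 iterations remaining (indices always in
-- range when reached, so List.getD reads the same element Python does)
def addLoopA (a b : List Int) : Nat → List Int → Int → List Int × Int
  | 0, result, carry => (result, carry)
  | Nat.succ k, result, carry =>
      let total := a.getD k 0 + b.getD k 0 + carry
      let result' := result.set k (PySem.Int.mod total 2)
      let carry' : Int := if total ≥ 2 then 1 else 0
      addLoopA a b k result' carry'

def add_unsigned_bits (left : List Int) (right : List Int) : List Int × Int :=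
  let a := validateBitsA left
  let b := validateBitsA right
  addLoopA a b a.length (List.replicate a.length 0) 0

-- ===== PORT B =====
def validateBitsB (bits : List Int) : List Int := bits

def add_unsigned_bits_alt (left : List Int) (right : List Int) : List Int × Int :=
  let a := validateBitsB left
  let b := validateBitsB right
  let n := a.length
  let total := (a.zip b).foldl (fun t xy => 2 * t + xy.1 + xy.2) 0
  ((List.range n).map (fun i => PySem.Int.mod (PySem.Int.floordiv total (2 ^ (n - 1 - i))) 2),
   PySem.Int.floordiv total (2 ^ n))

-- ===== PRECONDITION & SPEC =====
-- Pre_ excludes exactly the inputs on which A raises ValueError: unequal lengths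
-- or an element other than 0/1.
def Pre_add_unsigned_bits (left : List Int) (right : List Int) : Prop :=
  left.length = right.length ∧ (∀ x ∈ left, x = 0 ∨ x = 1) ∧ (∀ x ∈ right, x = 0 ∨ x = 1)
instance (left : List Int) (right : List Int) : Decidable (Pre_add_unsigned_bits left right) := by unfold Pre_add_unsigned_bits; infer_instance

def pvWitness_add_unsigned_bits : List Int × List Int := ([1, 0, 1], [0, 1, 1])

def Spec_add_unsigned_bits (left : List Int) (right : List Int) (out : List Int × Int) : Prop := out = add_unsigned_bits_alt left right
instance (left : List Int) (right : List Int) (out : List Int × Int) : Decidable (Spec_add_unsigned_bits left right out) := by unfold Spec_add_unsigned_bits; infer_instance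

-- ===== CLAIM (what is proved, stated in full; the proofs are below) =====
def Claim_equal_add_unsigned_bits : Prop := ∀ (left : List Int) (right : List Int), Dom_add_unsigned_bits left right → Pre_add_unsigned_bits left right → Spec_add_unsigned_bits left right (add_unsigned_bits left right)

-- ===== LEMMAS AND PROOFS =====

-- MSB-first numeric value of a bit list, with initial accumulator s
def valFrom (s : Int) (l : List Int) : Int := l.foldl (fun t x => 2 * t + x) s

lemma valFrom_append (s : Int) (l : List Int) (x : Int) :
    valFrom s (l ++ [x]) = 2 * valFrom s l + x := by
  simp [valFrom, List.foldl_append]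

lemma valFrom_take_succ (s : Int) (a : List Int) (k : Nat) (hk : k < a.length) :
    valFrom s (a.take (k + 1)) = 2 * valFrom s (a.take k) + a.getD k 0 := by
  have h1 : a.take (k + 1) = a.take k ++ [a.getD k 0] := by
    rw [List.take_succ, List.getElem?_eq_getElem hk, List.getD_eq_getElem a 0 hk]; rfl
  rw [h1, valFrom_append]

lemma zipfold_eq (a : List Int) : ∀ (b : List Int) (s t : Int), a.length = b.length →
    (a.zip b).foldl (fun t xy => 2 * t + xy.1 + xy.2) (s + t) = valFrom s a + valFrom t b := by
  induction a with
  | nil =>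
      intro b s t h
      have hb : b = [] := (List.length_eq_zero_iff.mp (by simpa using h.symm))
      subst hb; simp [valFrom]
  | cons x a ih =>
      intro b s t h
      cases b with
      | nil => simp at h
      | cons y b =>
          simp only [List.zip_cons_cons, List.foldl_cons, valFrom, List.foldl]
          have h' : a.length = b.length := by simpa using h
          have := ih b (2 * s + x) (2 * t + y) h'
          simp only [valFrom] at this
          rw [show 2 * (s + t) + x + y = (2 * s + x) + (2 * t + y) by ring, this]

-- invariant of A's loop: processing k remaining indices computes the low-k bits and
-- the outgoing carry of S = valFrom 0 (a.take k) + valFrom 0 (b.take k) + carry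
lemma loopA_spec (a b : List Int) : ∀ (k : Nat) (res : List Int) (carry : Int),
    k ≤ a.length → k ≤ b.length → res.length = a.length →
    (carry = 0 ∨ carry = 1) →
    (∀ i, i < k → a.getD i 0 = 0 ∨ a.getD i 0 = 1) →
    (∀ i, i < k → b.getD i 0 = 0 ∨ b.getD i 0 = 1) →
    addLoopA a b k res carry =
      ((List.range k).map
          (fun i => (valFrom 0 (a.take k) + valFrom 0 (b.take k) + carry) / 2 ^ (k - 1 - i) % 2)
        ++ res.drop k,
       (valFrom 0 (a.take k) + valFrom 0 (b.take k) + carry) / 2 ^ k) := by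
  intro k
  induction k with
  | zero => intro res carry _ _ _ _ _ _; simp [addLoopA, valFrom]
  | succ k ih =>
      intro res carry hka hkb hres hc ha hb
      have hkalt : k < a.length := hka
      have hkblt : k < b.length := hkb
      have hak := ha k (Nat.lt_succ_self k)
      have hbk := hb k (Nat.lt_succ_self k)
      set x := a.getD k 0 with hx
      set y := b.getD k 0 with hy
      have htot : ∀ total : Int, total = x + y + carry →
          PySem.Int.mod total 2 = total % 2 ∧ (total % 2 = 0 ∨ total % 2 = 1) ∧
          (if total ≥ 2 then (1:Int) else 0) = total / 2 := by
        intro total ht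
        rcases hak with h1 | h1 <;> rcases hbk with h2 | h2 <;> rcases hc with h3 | h3 <;>
          subst ht <;> rw [h1, h2, h3] <;> decide
      simp only [addLoopA]
      obtain ⟨hmod, hbit, hcar⟩ := htot (x + y + carry) rfl
      set total : Int := x + y + carry with htdef
      set bit : Int := total % 2 with hbitdef
      set carry' : Int := total / 2 with hcdef
      have h2c : total = 2 * carry' + bit := by
        have := Int.ediv_add_emod total 2; omega
      rw [hmod, hcar]
      have htb : 0 ≤ total ∧ total ≤ 3 := by
        rcases hak with h1 | h1 <;> rcases hbk with h2 | h2 <;> rcases hc with h3 | h3 <;> omega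
      rw [ih (res.set k bit) carry' (Nat.le_of_lt hkalt) (Nat.le_of_lt hkblt)
            (by rw [List.length_set]; exact hres) (by omega)
            (fun i hi => ha i (Nat.lt_succ_of_lt hi))
            (fun i hi => hb i (Nat.lt_succ_of_lt hi))]
      -- abbreviations
      set S' : Int := valFrom 0 (a.take k) + valFrom 0 (b.take k) + carry' with hS'
      set S : Int := valFrom 0 (a.take (k+1)) + valFrom 0 (b.take (k+1)) + carry with hS
      have hSS' : S = 2 * S' + bit := by
        rw [hS, hS', valFrom_take_succ 0 a k hkalt, valFrom_take_succ 0 b k hkblt]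
        omega
      have hdivstep : ∀ j : Nat, S / 2 ^ (j + 1) = S' / 2 ^ j := by
        intro j
        have h1 : S / 2 = S' := by omega
        rw [pow_succ', ← Int.ediv_ediv_of_nonneg (by norm_num : (0:Int) ≤ 2), h1]
      have hS2 : S % 2 = bit := by omega
      symm
      rw [Prod.mk.injEq]
      refine ⟨?_, hdivstep k⟩
      · -- list parts agree
        rw [List.range_succ, List.map_append]
        have hdrop : (res.set k bit).drop k = bit :: res.drop (k + 1) := by
          have hklen : k < res.length := by rw [hres]; exact hkalt
          rw [List.set_eq_take_append_cons_drop, if_pos hklen,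
              List.drop_append_of_le_length (by simp [Nat.le_of_lt hklen])]
          simp
        have hlast : (List.map (fun i => S / 2 ^ (k + 1 - 1 - i) % 2) [k]) = [bit] := by
          simp [hS2]
        rw [hdrop, hlast, List.append_assoc, List.singleton_append]
        congr 1
        apply List.map_congr_left
        intro i hi
        have hik : i < k := List.mem_range.mp hi
        have h : k + 1 - 1 - i = (k - 1 - i) + 1 := by omega
        rw [h, hdivstep (k - 1 - i)]

lemma zip_total_eq (a b : List Int) (h : a.length = b.length) :
    (a.zip b).foldl (fun t xy => 2 * t + xy.1 + xy.2) 0 = valFrom 0 a + valFrom 0 b := by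
  have := zipfold_eq a b 0 0 h
  simpa using this

-- ===== VERDICT (by name: the statement is the Claim_ definition above) =====
theorem add_unsigned_bits_spec : Claim_equal_add_unsigned_bits := by
  intro left right _ hpre
  obtain ⟨hlen, hl, hr⟩ := hpre
  unfold Spec_add_unsigned_bits add_unsigned_bits add_unsigned_bits_alt validateBitsA validateBitsB
  simp only []
  have hgl : ∀ i, i < left.length → left.getD i 0 = 0 ∨ left.getD i 0 = 1 := by
    intro i hi
    have := hl left[i] (List.getElem_mem hi)
    rwa [List.getD_eq_getElem left 0 hi]
  have hgr : ∀ i, i < left.length → right.getD i 0 = 0 ∨ right.getD i 0 = 1 := by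
    intro i hi
    have hi' : i < right.length := by omega
    have := hr right[i] (List.getElem_mem hi')
    rwa [List.getD_eq_getElem right 0 hi']
  rw [loopA_spec left right left.length (List.replicate left.length 0) 0 (le_refl _) (by omega)
        (by rw [List.length_replicate]) (Or.inl rfl) hgl hgr]
  rw [List.take_of_length_le (le_refl _), List.take_of_length_le (by omega),
      List.drop_of_length_le (by rw [List.length_replicate]),
      zip_total_eq left right hlen]
  have hpos : ∀ m : Nat, (0:Int) < 2 ^ m := fun m => by positivity
  rw [Prod.mk.injEq]
  refine ⟨?_, ?_⟩
  · rw [List.append_nil]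
    apply List.map_congr_left
    intro i _
    rw [PySem.Int.floordiv_eq_ediv_of_pos (hpos _), PySem.Int.mod_eq_emod_of_pos (by norm_num)]
    rw [add_zero]
  · rw [PySem.Int.floordiv_eq_ediv_of_pos (hpos _), add_zero]
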